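-- pv_equiv track=rewrite | github.com/vriken/market-flows | market_flows/regime.py | _composite_label
-- ===== SOURCE A (Python) =====
-- def _composite_label(vol, cycle, risk, monetary, credit=None):
--     """Derive a short composite label from the dimension states."""
--     # 5-tuple patterns: (vol, cycle, risk, monetary, credit)
--     # None = wildcard (matches anything)
--     labels = {
--         # Crisis conditions — credit stress reinforces
--         ("Crisis", None, "Risk-Off", None, "Stress"): "Credit Crisis",
--         ("Crisis", None, "Risk-Off", None, None): "Crisis Mode",
--         ("Crisis", None, None, None, None): "Vol Spike",
--         ("Elevated", None, "Risk-Off", None, "Stress"): "Credit Stress",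
--         ("Elevated", None, "Risk-Off", None, None): "Stress Rising",
--
--         # Complacency — tight credit confirms
--         ("Low Vol", "Expansion", "Risk-On", None, "Complacent"): "Max Complacency",
--         ("Low Vol", "Expansion", "Risk-On", None, None): "Complacent Bull",
--         ("Low Vol", "Late Cycle", "Risk-On", None, None): "Complacent Late Cycle",
--         ("Low Vol", None, "Risk-On", None, None): "Low Vol Risk-On",
--
--         # Late cycle
--         (None, "Late Cycle", "Risk-Off", "Tightening", None): "Late Cycle Stress",
--         (None, "Late Cycle", "Risk-On", None, None): "Fragile Risk-On",
--         (None, "Late Cycle", None, None, None): "Late Cycle",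
--
--         # Contraction
--         (None, "Contraction", "Risk-Off", None, None): "Defensive Pivot",
--         (None, "Contraction", None, "Easing", None): "Easing into Weakness",
--         (None, "Contraction", None, None, None): "Contraction",
--
--         # Recovery
--         (None, "Recovery", "Risk-On", "Easing", None): "Recovery Rally",
--         (None, "Recovery", None, None, None): "Early Recovery",
--
--         # Expansion
--         (None, "Expansion", "Risk-On", None, None): "Healthy Expansion",
--         (None, "Expansion", None, None, None): "Expansion",
--     }
--
--     dims = [vol, cycle, risk, monetary, credit]
--     for pattern, label in labels.items():
--         match = True
--         for actual, expected in zip(dims, pattern, strict=True):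
--             if expected is not None and actual != expected:
--                 match = False
--                 break
--         if match:
--             return label
--
--     # Fallback: concatenate available dimensions
--     parts = [d for d in [cycle, risk] if d]
--     if vol and vol not in ("Normal",):
--         parts.insert(0, vol)
--     return " / ".join(parts) if parts else "Indeterminate"
-- ===== SOURCE B (Python) =====
-- def _composite_label(vol, cycle, risk, monetary, credit=None):
--     """Derive a short composite label from the dimension states."""
--     if vol == "Crisis":
--         if risk == "Risk-Off":
--             return "Credit Crisis" if credit == "Stress" else "Crisis Mode"
--         return "Vol Spike"
--     if vol == "Elevated" and risk == "Risk-Off":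
--         return "Credit Stress" if credit == "Stress" else "Stress Rising"
--     if vol == "Low Vol" and risk == "Risk-On":
--         if cycle == "Expansion":
--             return "Max Complacency" if credit == "Complacent" else "Complacent Bull"
--         if cycle == "Late Cycle":
--             return "Complacent Late Cycle"
--         return "Low Vol Risk-On"
--     if cycle == "Late Cycle":
--         if risk == "Risk-Off" and monetary == "Tightening":
--             return "Late Cycle Stress"
--         if risk == "Risk-On":
--             return "Fragile Risk-On"
--         return "Late Cycle"
--     if cycle == "Contraction":
--         if risk == "Risk-Off":
--             return "Defensive Pivot"
--         if monetary == "Easing":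
--             return "Easing into Weakness"
--         return "Contraction"
--     if cycle == "Recovery":
--         if risk == "Risk-On" and monetary == "Easing":
--             return "Recovery Rally"
--         return "Early Recovery"
--     if cycle == "Expansion":
--         return "Healthy Expansion" if risk == "Risk-On" else "Expansion"
--     parts = [d for d in [cycle, risk] if d]
--     if vol and vol not in ("Normal",):
--         parts.insert(0, vol)
--     return " / ".join(parts) if parts else "Indeterminate"
-- ===== Notes on version B (the rewrite author's own statement) =====
-- stated objective: simpler
-- what changed: Replaced the 19-entry wildcard-pattern dict and the generic zip-based matching loop with a direct nested if/elif dispatch on the five dimension values, factored by vol then cycle in the same first-match priority, keeping the identical truthy-parts fallback.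
import Mathlib
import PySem

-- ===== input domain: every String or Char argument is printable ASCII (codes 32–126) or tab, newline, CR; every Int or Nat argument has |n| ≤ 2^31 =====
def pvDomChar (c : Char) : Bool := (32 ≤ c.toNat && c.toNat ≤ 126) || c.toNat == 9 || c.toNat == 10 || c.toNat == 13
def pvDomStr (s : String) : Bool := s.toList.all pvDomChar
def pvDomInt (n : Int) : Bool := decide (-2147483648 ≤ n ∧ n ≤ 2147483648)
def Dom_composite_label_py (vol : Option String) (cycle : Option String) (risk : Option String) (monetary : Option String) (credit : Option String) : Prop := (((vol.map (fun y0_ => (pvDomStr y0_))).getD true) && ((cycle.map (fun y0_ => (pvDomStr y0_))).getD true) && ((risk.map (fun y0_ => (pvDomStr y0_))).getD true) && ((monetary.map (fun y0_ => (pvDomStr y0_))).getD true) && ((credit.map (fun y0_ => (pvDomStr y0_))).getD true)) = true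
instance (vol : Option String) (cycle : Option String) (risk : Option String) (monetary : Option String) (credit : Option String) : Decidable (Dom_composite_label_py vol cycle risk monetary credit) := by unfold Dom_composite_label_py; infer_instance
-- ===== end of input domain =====

-- B replaces A's wildcard-pattern table scan by an explicit nested if/elif dispatch in the same
-- first-match priority (objective: simpler decomposition, same fallback join).


-- ===== PORT A =====
-- A's pattern table in dict order; none = wildcard, exactly as in the Python dict.
def pvLabels : List (List (Option String) × String) :=
  [ ([some "Crisis", none, some "Risk-Off", none, some "Stress"], "Credit Crisis"),
    ([some "Crisis", none, some "Risk-Off", none, none], "Crisis Mode"),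
    ([some "Crisis", none, none, none, none], "Vol Spike"),
    ([some "Elevated", none, some "Risk-Off", none, some "Stress"], "Credit Stress"),
    ([some "Elevated", none, some "Risk-Off", none, none], "Stress Rising"),
    ([some "Low Vol", some "Expansion", some "Risk-On", none, some "Complacent"], "Max Complacency"),
    ([some "Low Vol", some "Expansion", some "Risk-On", none, none], "Complacent Bull"),
    ([some "Low Vol", some "Late Cycle", some "Risk-On", none, none], "Complacent Late Cycle"),
    ([some "Low Vol", none, some "Risk-On", none, none], "Low Vol Risk-On"),
    ([none, some "Late Cycle", some "Risk-Off", some "Tightening", none], "Late Cycle Stress"),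
    ([none, some "Late Cycle", some "Risk-On", none, none], "Fragile Risk-On"),
    ([none, some "Late Cycle", none, none, none], "Late Cycle"),
    ([none, some "Contraction", some "Risk-Off", none, none], "Defensive Pivot"),
    ([none, some "Contraction", none, some "Easing", none], "Easing into Weakness"),
    ([none, some "Contraction", none, none, none], "Contraction"),
    ([none, some "Recovery", some "Risk-On", some "Easing", none], "Recovery Rally"),
    ([none, some "Recovery", none, none, none], "Early Recovery"),
    ([none, some "Expansion", some "Risk-On", none, none], "Healthy Expansion"),
    ([none, some "Expansion", none, none, none], "Expansion") ]

-- inner loop: 'expected is not None and actual != expected' breaks the match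
def pvMatches (dims pat : List (Option String)) : Bool :=
  (dims.zip pat).all (fun p => p.2 == none || p.1 == p.2)

-- outer loop with early return
def pvFirstLabel (dims : List (Option String)) : List (List (Option String) × String) → Option String
  | [] => none
  | (pat, label) :: rest => if pvMatches dims pat then some label else pvFirstLabel dims rest

-- Python truthiness of an optional string
def pvTruthy : Option String → Bool
  | none => false
  | some s => !(s == "")

def composite_label_py (vol : Option String) (cycle : Option String) (risk : Option String) (monetary : Option String) (credit : Option String) : String :=
  match pvFirstLabel [vol, cycle, risk, monetary, credit] pvLabels with
  | some label => label
  | none =>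
    let parts := ([cycle, risk].filter pvTruthy).filterMap id
    let parts := if pvTruthy vol && !(vol == some "Normal") then
        (vol.getD "") :: parts else parts
    if parts.isEmpty then "Indeterminate" else PySem.Str.join " / " parts

-- ===== PORT B =====
def composite_label_py_alt (vol : Option String) (cycle : Option String) (risk : Option String) (monetary : Option String) (credit : Option String) : String :=
  if vol == some "Crisis" then
    (if risk == some "Risk-Off" then
      (if credit == some "Stress" then "Credit Crisis" else "Crisis Mode")
     else "Vol Spike")
  else if vol == some "Elevated" && risk == some "Risk-Off" then
    (if credit == some "Stress" then "Credit Stress" else "Stress Rising")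
  else if vol == some "Low Vol" && risk == some "Risk-On" then
    (if cycle == some "Expansion" then
      (if credit == some "Complacent" then "Max Complacency" else "Complacent Bull")
     else if cycle == some "Late Cycle" then "Complacent Late Cycle"
     else "Low Vol Risk-On")
  else if cycle == some "Late Cycle" then
    (if risk == some "Risk-Off" && monetary == some "Tightening" then "Late Cycle Stress"
     else if risk == some "Risk-On" then "Fragile Risk-On"
     else "Late Cycle")
  else if cycle == some "Contraction" then
    (if risk == some "Risk-Off" then "Defensive Pivot"
     else if monetary == some "Easing" then "Easing into Weakness"
     else "Contraction")
  else if cycle == some "Recovery" then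
    (if risk == some "Risk-On" && monetary == some "Easing" then "Recovery Rally"
     else "Early Recovery")
  else if cycle == some "Expansion" then
    (if risk == some "Risk-On" then "Healthy Expansion" else "Expansion")
  else
    let parts := ([cycle, risk].filter pvTruthy).filterMap id
    let parts := if pvTruthy vol && !(vol == some "Normal") then
        (vol.getD "") :: parts else parts
    if parts.isEmpty then "Indeterminate" else PySem.Str.join " / " parts

-- ===== PRECONDITION & SPEC =====
def Spec_composite_label_py (vol : Option String) (cycle : Option String) (risk : Option String) (monetary : Option String) (credit : Option String) (out : String) : Prop := out = composite_label_py_alt vol cycle risk monetary credit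
instance (vol : Option String) (cycle : Option String) (risk : Option String) (monetary : Option String) (credit : Option String) (out : String) : Decidable (Spec_composite_label_py vol cycle risk monetary credit out) := by unfold Spec_composite_label_py; infer_instance

-- ===== CLAIM (what is proved, stated in full; the proofs are below) =====
def Claim_equal_composite_label_py : Prop := ∀ (vol : Option String) (cycle : Option String) (risk : Option String) (monetary : Option String) (credit : Option String), Dom_composite_label_py vol cycle risk monetary credit → Spec_composite_label_py vol cycle risk monetary credit (composite_label_py vol cycle risk monetary credit)

-- ===== LEMMAS AND PROOFS =====
-- A's table scan, abstracted over the 13 atomic comparisons it performs (proof-only helper).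
def pvLin (vC vE vL cEx cLC cCt cR rOn rOff mT mE crS crComp : Bool) : Option String :=
  if vC && (rOff && (crS && true)) then some "Credit Crisis"
  else if vC && (rOff && true) then some "Crisis Mode"
  else if vC && true then some "Vol Spike"
  else if vE && (rOff && (crS && true)) then some "Credit Stress"
  else if vE && (rOff && true) then some "Stress Rising"
  else if vL && (cEx && (rOn && (crComp && true))) then some "Max Complacency"
  else if vL && (cEx && (rOn && true)) then some "Complacent Bull"
  else if vL && (cLC && (rOn && true)) then some "Complacent Late Cycle"
  else if vL && (rOn && true) then some "Low Vol Risk-On"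
  else if cLC && (rOff && (mT && true)) then some "Late Cycle Stress"
  else if cLC && (rOn && true) then some "Fragile Risk-On"
  else if cLC && true then some "Late Cycle"
  else if cCt && (rOff && true) then some "Defensive Pivot"
  else if cCt && (mE && true) then some "Easing into Weakness"
  else if cCt && true then some "Contraction"
  else if cR && (rOn && (mE && true)) then some "Recovery Rally"
  else if cR && true then some "Early Recovery"
  else if cEx && (rOn && true) then some "Healthy Expansion"
  else if cEx && true then some "Expansion"
  else none

theorem pvA_char (vol cycle risk monetary credit : Option String) :
    composite_label_py vol cycle risk monetary credit =
    (match pvLin (vol == some "Crisis") (vol == some "Elevated") (vol == some "Low Vol")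
        (cycle == some "Expansion") (cycle == some "Late Cycle") (cycle == some "Contraction")
        (cycle == some "Recovery") (risk == some "Risk-On") (risk == some "Risk-Off")
        (monetary == some "Tightening") (monetary == some "Easing")
        (credit == some "Stress") (credit == some "Complacent") with
     | some label => label
     | none =>
       let parts := ([cycle, risk].filter pvTruthy).filterMap id
       let parts := if pvTruthy vol && !(vol == some "Normal") then
           (vol.getD "") :: parts else parts
       if parts.isEmpty then "Indeterminate" else PySem.Str.join " / " parts) := rfl

-- ===== VERDICT (by name: the statement is the Claim_ definition above) =====
set_option maxHeartbeats 4000000 in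
theorem composite_label_py_spec : Claim_equal_composite_label_py := by
  intro vol cycle risk monetary credit _
  unfold Spec_composite_label_py
  rw [pvA_char]
  unfold composite_label_py_alt
  cases vol == some "Crisis" <;> cases vol == some "Elevated" <;> cases vol == some "Low Vol" <;>
    cases cycle == some "Expansion" <;> cases cycle == some "Late Cycle" <;>
    cases cycle == some "Contraction" <;> cases cycle == some "Recovery" <;>
    cases risk == some "Risk-On" <;> cases risk == some "Risk-Off" <;>
    cases monetary == some "Tightening" <;> cases monetary == some "Easing" <;>
    cases credit == some "Stress" <;> cases credit == some "Complacent" <;> rfl
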